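-- pv_equiv track=rewrite | github.com/danrus32/VkBot | vklongpol/vk.py | _clean_all_tag_from_str
-- ===== SOURCE A (Python) =====
-- def _clean_all_tag_from_str(string_line):
--     result = ""
--     not_skip = True
--     for i in list(string_line):
--         if not_skip:
--             if i == "<":
--                 not_skip = False
--             else:
--                 result += i
--         else:
--             if i == ">":
--                 not_skip = True
--
--     return result
-- ===== SOURCE B (Python) =====
-- import re
--
-- def _clean_all_tag_from_str(string_line):
--     return re.sub(r'<[^>]*>?', '', string_line)
-- ===== Notes on version B (the rewrite author's own statement) =====
-- stated objective: faster
-- what changed: Replaces the manual character loop with its result string and not_skip flag by a single regex substitution that deletes each tag segment, with an optional closing bracket so an unclosed trailing tag is removed too, matching A exactly.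
import Mathlib
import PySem

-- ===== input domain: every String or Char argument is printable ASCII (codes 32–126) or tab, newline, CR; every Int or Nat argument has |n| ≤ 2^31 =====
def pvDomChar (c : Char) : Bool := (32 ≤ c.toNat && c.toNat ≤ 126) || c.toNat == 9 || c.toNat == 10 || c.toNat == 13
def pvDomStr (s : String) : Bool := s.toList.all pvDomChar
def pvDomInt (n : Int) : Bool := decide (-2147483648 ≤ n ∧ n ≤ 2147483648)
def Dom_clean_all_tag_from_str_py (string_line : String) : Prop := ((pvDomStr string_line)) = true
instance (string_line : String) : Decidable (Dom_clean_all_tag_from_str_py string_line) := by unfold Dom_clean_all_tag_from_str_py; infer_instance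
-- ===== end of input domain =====

-- B replaces A's manual scan-and-toggle loop with a single regex substitution
-- re.sub(r'<[^>]*>?', '', string_line) (more idiomatic; same exact result).


-- ===== PORT A =====
-- one loop step: the body of A's `for i in list(string_line)` acting on (result, not_skip)
def pvAStep (st : String × Bool) (c : Char) : String × Bool :=
  if st.2 then
    (if c = '<' then (st.1, false) else (st.1.push c, st.2))
  else
    (if c = '>' then (st.1, true) else st)

def clean_all_tag_from_str_py (string_line : String) : String :=
  (string_line.toList.foldl pvAStep ("", true)).1

-- ===== PORT B =====
-- Hand port of the regex substitution re.sub(r'<[^>]*>?', '', s): at each match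
-- of '<', the engine consumes everything up to and including the next '>' (or to
-- the end of the string if none) and replaces it by ''; other characters pass
-- through.  Exact on all strings.
-- drop the characters matched by `[^>]*>?` after a '<'
def pvDropTag : List Char → List Char
  | [] => []
  | c :: rest => if c = '>' then rest else pvDropTag rest

theorem pvDropTag_length_le : ∀ l : List Char, (pvDropTag l).length ≤ l.length
  | [] => le_refl _
  | c :: rest => by
    simp only [pvDropTag]
    split
    · simp
    · exact (pvDropTag_length_le rest).trans (Nat.le_succ _)

-- replace every occurrence of the regex (leftmost, non-overlapping) by ''
def pvSubTags : List Char → List Char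
  | [] => []
  | c :: rest =>
    if c = '<' then pvSubTags (pvDropTag rest) else c :: pvSubTags rest
termination_by l => l.length
decreasing_by
  · exact Nat.lt_succ_of_le (pvDropTag_length_le rest)
  · simp

def clean_all_tag_from_str_py_alt (string_line : String) : String :=
  String.ofList (pvSubTags string_line.toList)

-- ===== PRECONDITION & SPEC =====
def Spec_clean_all_tag_from_str_py (string_line : String) (out : String) : Prop := out = clean_all_tag_from_str_py_alt string_line
instance (string_line : String) (out : String) : Decidable (Spec_clean_all_tag_from_str_py string_line out) := by unfold Spec_clean_all_tag_from_str_py; infer_instance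

-- ===== CLAIM (what is proved, stated in full; the proofs are below) =====
def Claim_equal_clean_all_tag_from_str_py : Prop := ∀ (string_line : String), Dom_clean_all_tag_from_str_py string_line → Spec_clean_all_tag_from_str_py string_line (clean_all_tag_from_str_py string_line)

-- ===== LEMMAS AND PROOFS =====
-- While not_skip = False, A only looks for '>': the accumulated result after the
-- rest of the loop is the one obtained by restarting in state True after pvDropTag.
theorem pvSkip_eq : ∀ (l : List Char) (res : String),
    ((l.foldl pvAStep (res, false)).1) = (((pvDropTag l).foldl pvAStep (res, true)).1)
  | [], res => rfl
  | c :: rest, res => by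
    simp only [List.foldl_cons, pvAStep, pvDropTag]
    by_cases h : c = '>' <;> simp [h, pvSkip_eq rest res]

-- length-bounded induction: A's loop in state True computes res ++ pvSubTags l
theorem pvMain : ∀ (n : Nat) (l : List Char), l.length ≤ n → ∀ (res : String),
    ((l.foldl pvAStep (res, true)).1).toList = res.toList ++ pvSubTags l := by
  intro n
  induction n with
  | zero =>
    intro l hl res
    have : l = [] := List.eq_nil_of_length_eq_zero (Nat.le_zero.mp hl)
    subst this; simp [pvSubTags]
  | succ n ih =>
    intro l hl res
    match l with
    | [] => simp [pvSubTags]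
    | c :: rest =>
      have hr : rest.length ≤ n := Nat.lt_succ_iff.mp hl
      simp only [List.foldl_cons, pvAStep, pvSubTags]
      by_cases h : c = '<'
      · have hd : (pvDropTag rest).length ≤ n := (pvDropTag_length_le rest).trans hr
        simp only [h, ite_true]
        rw [pvSkip_eq, ih _ hd res]
      · simp only [h, ite_true, ite_false]
        rw [ih _ hr (res.push c)]
        simp

-- ===== VERDICT (by name: the statement is the Claim_ definition above) =====
theorem clean_all_tag_from_str_py_spec : Claim_equal_clean_all_tag_from_str_py := by
  intro s _
  unfold Spec_clean_all_tag_from_str_py clean_all_tag_from_str_py clean_all_tag_from_str_py_alt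
  have h := pvMain s.toList.length s.toList (le_refl _) ""
  have h2 : (String.ofList (pvSubTags s.toList)).toList = pvSubTags s.toList := by simp
  apply String.toList_injective
  rw [h, h2]; rfl
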